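-- pv_equiv track=rewrite | github.com/akewarmayur/ModerateProfanity | textProfanity.py | replace_profanity_with_star
-- ===== SOURCE A (Python) =====
-- def replace_profanity_with_star(input_sentence, profane_dict):
--     list_of_words = input_sentence.split(" ")
--     result = []
--     for index, i in enumerate(list_of_words):
--         found = False
--         for key, value in profane_dict.items():
--             if index == value:
--                 result.append("***")
--                 found = True
--                 break
--         if not found:
--             result.append(i)
--     return " ".join(result)
-- ===== SOURCE B (Python) =====
-- def replace_profanity_with_star(input_sentence, profane_dict):
--     words = input_sentence.split(" ")
--     result = list(words)
--     n = len(words)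
--     for v in profane_dict.values():
--         if 0 <= v < n:
--             result[v] = "***"
--     return " ".join(result)
-- ===== Notes on version B (the rewrite author's own statement) =====
-- stated objective: alternative
-- what changed: B inverts A's per-word membership scan of the whole dict into a single scatter over the dict values that writes '***' at each in-range index position of the word list.
import Mathlib
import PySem

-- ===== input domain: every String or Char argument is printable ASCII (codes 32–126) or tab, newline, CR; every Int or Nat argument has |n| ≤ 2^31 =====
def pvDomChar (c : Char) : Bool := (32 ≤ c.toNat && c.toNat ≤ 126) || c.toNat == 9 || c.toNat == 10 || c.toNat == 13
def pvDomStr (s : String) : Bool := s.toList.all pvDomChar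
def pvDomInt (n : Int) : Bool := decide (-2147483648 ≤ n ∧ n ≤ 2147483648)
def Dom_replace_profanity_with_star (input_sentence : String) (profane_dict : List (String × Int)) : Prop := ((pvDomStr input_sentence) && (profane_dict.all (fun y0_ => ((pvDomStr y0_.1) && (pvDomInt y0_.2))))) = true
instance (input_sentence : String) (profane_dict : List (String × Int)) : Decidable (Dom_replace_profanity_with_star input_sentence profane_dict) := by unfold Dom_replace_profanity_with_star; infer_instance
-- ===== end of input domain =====

-- B replaces A's per-word scan of the dict by a single scatter over the dict values
-- writing "***" at each in-range index of the word list (objective: alternative decomposition).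

-- ===== PORT A =====
-- inner 'for key, value in profane_dict.items(): if index == value: … break' loop
def pvFoundA (index : Int) : List (String × Int) → Bool
  | [] => false
  | (_, value) :: rest => if index == value then true else pvFoundA index rest

def replace_profanity_with_star (input_sentence : String) (profane_dict : List (String × Int)) : String :=
  let list_of_words := (PySem.Chars.splitOn input_sentence.toList " ".toList).map String.mk
  let result := (PySem.List.enumerate list_of_words 0).foldl
    (fun acc p => if pvFoundA p.1 profane_dict then acc ++ ["***"] else acc ++ [p.2]) []
  PySem.Str.join " " result

-- ===== PORT B =====
def replace_profanity_with_star_alt (input_sentence : String) (profane_dict : List (String × Int)) : String :=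
  let words := (PySem.Chars.splitOn input_sentence.toList " ".toList).map String.mk
  let n : Int := words.length
  let result := profane_dict.foldl
    (fun acc p => if 0 ≤ p.2 && p.2 < n then acc.set p.2.toNat "***" else acc) words
  PySem.Str.join " " result

-- ===== PRECONDITION & SPEC =====
def Spec_replace_profanity_with_star (input_sentence : String) (profane_dict : List (String × Int)) (out : String) : Prop := out = replace_profanity_with_star_alt input_sentence profane_dict
instance (input_sentence : String) (profane_dict : List (String × Int)) (out : String) : Decidable (Spec_replace_profanity_with_star input_sentence profane_dict out) := by unfold Spec_replace_profanity_with_star; infer_instance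

-- ===== CLAIM (what is proved, stated in full; the proofs are below) =====
def Claim_equal_replace_profanity_with_star : Prop := ∀ (input_sentence : String) (profane_dict : List (String × Int)), Dom_replace_profanity_with_star input_sentence profane_dict → Spec_replace_profanity_with_star input_sentence profane_dict (replace_profanity_with_star input_sentence profane_dict)

-- ===== LEMMAS AND PROOFS =====

-- the scatter step of B
def pvStep (n : Int) (acc : List String) (p : String × Int) : List String :=
  if 0 ≤ p.2 && p.2 < n then acc.set p.2.toNat "***" else acc

theorem pvStep_length (n : Int) (acc : List String) (p : String × Int) :
    (pvStep n acc p).length = acc.length := by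
  unfold pvStep; split <;> simp

theorem pvScatter_length (d : List (String × Int)) (n : Int) (acc : List String) :
    (d.foldl (pvStep n) acc).length = acc.length := by
  induction d generalizing acc with
  | nil => rfl
  | cons p rest ih => simpa [List.foldl_cons, pvStep_length] using ih (pvStep n acc p)

theorem pvScatter_get (d : List (String × Int)) (n : Int) (acc : List String) (i : Nat)
    (hlen : (acc.length : Int) = n) (hi : i < acc.length) :
    (d.foldl (pvStep n) acc)[i]? =
      (if pvFoundA (i : Int) d then some "***" else acc[i]?) := by
  induction d generalizing acc with
  | nil => simp [pvFoundA, List.getElem?_eq_getElem hi]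
  | cons p rest ih =>
    rw [List.foldl_cons]
    have hlen' : ((pvStep n acc p).length : Int) = n := by rw [pvStep_length]; exact hlen
    have hi' : i < (pvStep n acc p).length := by rw [pvStep_length]; exact hi
    rw [ih (pvStep n acc p) hlen' hi']
    by_cases hv : (i : Int) = p.2
    · have hstep : (pvStep n acc p)[i]? = some "***" := by
        unfold pvStep
        have hg : (0 ≤ p.2 && p.2 < n) = true := by
          simp only [Bool.and_eq_true, decide_eq_true_eq]
          constructor
          · omega
          · rw [← hv, ← hlen]; exact_mod_cast hi
        rw [hg]
        simp only [if_true]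
        have : p.2.toNat = i := by omega
        rw [this]
        exact List.getElem?_set_self (by simpa using hi)
      simp [pvFoundA, ← hv, hstep]
    · have hstep : (pvStep n acc p)[i]? = acc[i]? := by
        unfold pvStep
        split
        · next hg =>
          simp only [Bool.and_eq_true, decide_eq_true_eq] at hg
          have : p.2.toNat ≠ i := by omega
          exact List.getElem?_set_ne this
        · rfl
      have hf : pvFoundA (i : Int) (p :: rest) = pvFoundA (i : Int) rest := by
        simp [pvFoundA, hv]
      rw [hf, hstep]

theorem pvAppendFold_eq_map (d : List (String × Int)) (l : List (Int × String)) (acc : List String) :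
    l.foldl (fun acc p => if pvFoundA p.1 d then acc ++ ["***"] else acc ++ [p.2]) acc
      = acc ++ l.map (fun p => if pvFoundA p.1 d then "***" else p.2) := by
  induction l generalizing acc with
  | nil => simp
  | cons p rest ih =>
    simp only [List.foldl_cons, List.map_cons]
    by_cases h : pvFoundA p.1 d <;> simp [h, ih]

theorem pvLists_eq (d : List (String × Int)) (words : List String) :
    (PySem.List.enumerate words 0).map (fun p => if pvFoundA p.1 d then "***" else p.2)
      = d.foldl (pvStep (words.length : Int)) words := by
  apply List.ext_getElem?
  intro i
  by_cases hi : i < words.length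
  · rw [List.getElem?_map, PySem.List.getElem?_enumerate,
      pvScatter_get d (words.length : Int) words i rfl hi,
      List.getElem?_eq_getElem hi]
    simp only [Option.map_some, Int.zero_add]
    split <;> rfl
  · have h1 : (words.length : Nat) ≤ i := Nat.le_of_not_lt hi
    rw [List.getElem?_eq_none (by simpa [PySem.List.length_enumerate] using h1),
      List.getElem?_eq_none (by simpa [pvScatter_length] using h1)]

-- ===== VERDICT (by name: the statement is the Claim_ definition above) =====
theorem replace_profanity_with_star_spec : Claim_equal_replace_profanity_with_star := by
  intro s d _
  show replace_profanity_with_star s d = replace_profanity_with_star_alt s d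
  unfold replace_profanity_with_star replace_profanity_with_star_alt
  simp only []
  rw [pvAppendFold_eq_map d (PySem.List.enumerate ((PySem.Chars.splitOn s.toList " ".toList).map String.mk) 0) []]
  rw [List.nil_append]
  rw [pvLists_eq d ((PySem.Chars.splitOn s.toList " ".toList).map String.mk)]
  rfl
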